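-- pv_equiv track=rewrite | github.com/Moxin1044/qsnctf-python | qsnctf/misc.py | qwerty_encode
-- ===== SOURCE A (Python) =====
-- def qwerty_encode(source_text):
--     str1 = "qwertyuiopasdfghjklzxcvbnmQWERTYUIOPASDFGHJKLZXCVBNM"
--     str2 = "abcdefghijklmnopqrstuvwxyzABCDEFGHIJKLMNOPQRSTUVWXYZ"
--     result_text = ""
--     for s in source_text:
--         if s in str1:
--             if s != ' ':
--                 result_text = result_text + str1[str2.index(s)]
--             else:
--                 result_text = result_text + ' '
--         else:
--             return 'Qwerty只能对字母编码!'
--     return result_text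
-- ===== SOURCE B (Python) =====
-- _Q = "qwertyuiopasdfghjklzxcvbnm"
--
-- def qwerty_encode(source_text):
--     codes = [ord(c) for c in source_text]
--     if not all(65 <= o <= 90 or 97 <= o <= 122 for o in codes):
--         return 'Qwerty只能对字母编码!'
--     return ''.join(_Q[o - 97] if o >= 97 else _Q[o - 65].upper() for o in codes)
-- ===== Notes on version B (the rewrite author's own statement) =====
-- stated objective: idiomatic
-- what changed: A scans a 52-char alphabet string per character (membership test plus str.index) in one loop with early return; B maps the text to ordinal codes, validates them all by ASCII range arithmetic in one pass, then translates in a second pass by arithmetic indexing into a single 26-char lowercase qwerty table, restoring upper case with .upper().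
import Mathlib
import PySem

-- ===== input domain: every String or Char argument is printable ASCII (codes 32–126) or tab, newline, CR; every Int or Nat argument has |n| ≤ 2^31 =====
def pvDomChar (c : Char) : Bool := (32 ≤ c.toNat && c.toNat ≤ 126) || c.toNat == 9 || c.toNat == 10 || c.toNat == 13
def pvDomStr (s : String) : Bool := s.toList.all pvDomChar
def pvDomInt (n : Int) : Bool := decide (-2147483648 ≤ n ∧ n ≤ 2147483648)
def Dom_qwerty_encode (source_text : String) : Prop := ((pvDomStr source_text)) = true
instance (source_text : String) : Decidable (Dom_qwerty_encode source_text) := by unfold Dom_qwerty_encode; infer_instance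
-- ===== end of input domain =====

set_option maxRecDepth 2000

-- B drops A's char-by-char search loop (membership in a 52-char string, str.index lookup,
-- early return) for staged passes on character CODES: validate by ASCII range arithmetic,
-- then translate by arithmetic indexing into a 26-char table with case restored (idiomatic).

-- ===== PORT A =====
def qwertyStr1 : List Char := "qwertyuiopasdfghjklzxcvbnmQWERTYUIOPASDFGHJKLZXCVBNM".toList
def qwertyStr2 : List Char := "abcdefghijklmnopqrstuvwxyzABCDEFGHIJKLMNOPQRSTUVWXYZ".toList

-- str1[str2.index(s)]; none would be Python's ValueError/IndexError, unreachable since s ∈ str1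
def qwertyStepA (c : Char) : Option Char :=
  match PySem.List.index? qwertyStr2 c with
  | some i => PySem.List.pyGet? qwertyStr1 (i : Int)
  | none => none

def qwertyLoopA : List Char → List Char → String
  | [], acc => String.mk acc
  | c :: rest, acc =>
    if c ∈ qwertyStr1 then
      if c ≠ ' ' then
        match qwertyStepA c with
        | some c' => qwertyLoopA rest (acc ++ [c'])
        | none => String.mk acc   -- unreachable: c ∈ str1 ⇒ c ∈ str2 and index in range
      else qwertyLoopA rest (acc ++ [' '])
    else "Qwerty只能对字母编码!"

def qwerty_encode (source_text : String) : String :=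
  qwertyLoopA source_text.toList []

-- ===== PORT B =====
-- the 26-char lowercase qwerty table _Q
def qwerty26 : List Char := "qwertyuiopasdfghjklzxcvbnm".toList

-- _Q[o-97] / _Q[o-65].upper(); indices are in 0..25 inside each guarded branch, so plain
-- List.getD is exact for Python's _Q[i] there; Char.toUpper is exact on ASCII letters
def qwertyTrans (o : Nat) : Char :=
  if 97 ≤ o then qwerty26.getD (o - 97) ' ' else (qwerty26.getD (o - 65) ' ').toUpper

def qwerty_encode_alt (source_text : String) : String :=
  let codes := source_text.toList.map Char.toNat
  if codes.all (fun o => decide ((65 ≤ o ∧ o ≤ 90) ∨ (97 ≤ o ∧ o ≤ 122))) then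
    String.mk (codes.map qwertyTrans)
  else "Qwerty只能对字母编码!"

-- ===== PRECONDITION & SPEC =====
def Spec_qwerty_encode (source_text : String) (out : String) : Prop := out = qwerty_encode_alt source_text
instance (source_text : String) (out : String) : Decidable (Spec_qwerty_encode source_text out) := by unfold Spec_qwerty_encode; infer_instance

-- ===== CLAIM (what is proved, stated in full; the proofs are below) =====
def Claim_equal_qwerty_encode : Prop := ∀ (source_text : String), Dom_qwerty_encode source_text → Spec_qwerty_encode source_text (qwerty_encode source_text)

-- ===== LEMMAS AND PROOFS =====

-- every letter of str1 is not ' ', lies in the ASCII letter ranges, and A's lookup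
-- returns exactly B's arithmetic translation of its code (one boolean enumeration)
theorem qwerty_key_bool :
    qwertyStr1.all (fun c => (!(c == ' ')) &&
      (decide ((65 ≤ c.toNat ∧ c.toNat ≤ 90) ∨ (97 ≤ c.toNat ∧ c.toNat ≤ 122))) &&
      (qwertyStepA c == some (qwertyTrans c.toNat))) = true := by decide

theorem qwerty_key : ∀ c ∈ qwertyStr1, c ≠ ' ' ∧
    ((65 ≤ c.toNat ∧ c.toNat ≤ 90) ∨ (97 ≤ c.toNat ∧ c.toNat ≤ 122)) ∧
    qwertyStepA c = some (qwertyTrans c.toNat) := by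
  intro c hc
  have h := List.all_eq_true.mp qwerty_key_bool c hc
  simp only [Bool.and_eq_true, Bool.not_eq_true', beq_eq_false_iff_ne, ne_eq,
    decide_eq_true_eq, beq_iff_eq] at h
  exact ⟨h.1.1, h.1.2, h.2⟩

-- the codes 65..90 and 97..122 are exactly the codes of the chars of str1
theorem qwerty_codes_bool :
    ((List.range' 65 26 ++ List.range' 97 26).all
      (fun o => decide (o ∈ qwertyStr1.map Char.toNat))) = true := by decide

-- hence any char whose code is in the ASCII letter ranges is in str1
theorem qwerty_mem_of_range (c : Char)
    (h : (65 ≤ c.toNat ∧ c.toNat ≤ 90) ∨ (97 ≤ c.toNat ∧ c.toNat ≤ 122)) :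
    c ∈ qwertyStr1 := by
  have hmem : c.toNat ∈ List.range' 65 26 ++ List.range' 97 26 := by
    rcases h with ⟨h1, h2⟩ | ⟨h1, h2⟩ <;> simp [List.mem_append, List.mem_range'_1] <;> omega
  have hin : c.toNat ∈ qwertyStr1.map Char.toNat := by
    have := List.all_eq_true.mp qwerty_codes_bool _ hmem
    simpa using this
  obtain ⟨d, hd, he⟩ := List.mem_map.mp hin
  have hdc : d = c := Char.ext (UInt32.toNat_inj.mp he)
  exact hdc ▸ hd

theorem qwertyLoopA_eq (cs acc : List Char) :
    qwertyLoopA cs acc =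
      if cs.all (fun c => decide ((65 ≤ c.toNat ∧ c.toNat ≤ 90) ∨ (97 ≤ c.toNat ∧ c.toNat ≤ 122))) then
        String.mk (acc ++ cs.map (fun c => qwertyTrans c.toNat))
      else "Qwerty只能对字母编码!" := by
  induction cs generalizing acc with
  | nil => simp [qwertyLoopA]
  | cons c rest ih =>
    by_cases hc : c ∈ qwertyStr1
    · obtain ⟨hne, hrange, hstep⟩ := qwerty_key c hc
      simp [qwertyLoopA, hc, hne, hstep, hrange, ih]
    · have hr : ¬ ((65 ≤ c.toNat ∧ c.toNat ≤ 90) ∨ (97 ≤ c.toNat ∧ c.toNat ≤ 122)) :=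
        fun h => hc (qwerty_mem_of_range c h)
      simp [qwertyLoopA, hc, hr]

-- ===== VERDICT (by name: the statement is the Claim_ definition above) =====
theorem qwerty_encode_spec : Claim_equal_qwerty_encode := by
  intro s _
  unfold Spec_qwerty_encode qwerty_encode qwerty_encode_alt
  rw [qwertyLoopA_eq]
  simp [List.all_map, List.map_map, Function.comp_def]
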